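-- pv_equiv track=rewrite | github.com/Esteves31/ProjetoFinalGrafos | src/graph_utils.py | excentricidade_todos_vertices
-- ===== SOURCE A (Python) =====
-- from collections import deque
--
-- def excentricidade_todos_vertices(L):
--     excentricidades = {}
--     for v in L:
--         dist = {v: 0}
--         queue = deque([v])
--         while queue:
--             u = queue.popleft()
--             for w, _ in L[u]:
--                 if w not in dist:
--                     dist[w] = dist[u] + 1
--                     queue.append(w)
--         excentricidades[v] = max(dist.values())
--     return excentricidades
-- ===== SOURCE B (Python) =====
-- def excentricidade_todos_vertices(L):
--     def ecc(v):
--         reach = {v}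
--         depth = 0
--         while True:
--             new = {w for u in reach for w, _ in L[u]} - reach
--             if not new:
--                 return depth
--             reach |= new
--             depth += 1
--     return {v: ecc(v) for v in L}
-- ===== Notes on version B (the rewrite author's own statement) =====
-- stated objective: alternative
-- what changed: Each per-vertex queue/distance-dict BFS is replaced by a reachable-set fixpoint iteration: repeatedly take the neighbour set of the whole reachable set minus itself until nothing new appears, counting rounds; no queue, no per-node distance map, no final max() scan, and the outer dict loop becomes a dict comprehension.
import Mathlib
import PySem

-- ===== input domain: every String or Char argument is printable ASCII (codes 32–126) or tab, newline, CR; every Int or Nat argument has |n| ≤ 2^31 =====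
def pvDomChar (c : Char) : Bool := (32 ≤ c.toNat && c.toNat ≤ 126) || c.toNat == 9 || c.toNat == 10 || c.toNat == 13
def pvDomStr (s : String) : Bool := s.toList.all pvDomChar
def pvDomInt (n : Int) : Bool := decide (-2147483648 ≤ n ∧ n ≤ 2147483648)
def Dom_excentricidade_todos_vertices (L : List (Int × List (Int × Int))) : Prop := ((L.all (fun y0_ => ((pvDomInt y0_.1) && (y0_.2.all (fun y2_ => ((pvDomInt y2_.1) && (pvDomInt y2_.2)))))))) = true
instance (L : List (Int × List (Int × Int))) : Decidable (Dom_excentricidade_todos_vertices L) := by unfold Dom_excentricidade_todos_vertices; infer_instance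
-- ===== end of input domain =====

-- B replaces each per-vertex queue/distance-dict BFS by a reachable-set fixpoint iteration
-- (new = N(reach) - reach each round, counting rounds); alternative algorithm, equal purpose.

-- ===== PORT A =====
-- while queue: u = queue.popleft(); for w,_ in L[u]: if w not in dist: dist[w] = dist[u]+1; queue.append(w)
def pvBfsA (D : PySem.Dict Int (List (Int × Int))) : Nat → PySem.Dict Int Int → List Int → PySem.Dict Int Int
  | 0, dist, _ => dist
  | _ + 1, dist, [] => dist
  | fuel + 1, dist, u :: rest =>
      let s := (D.getD u []).foldl
        (fun (s : PySem.Dict Int Int × List Int) p =>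
          if s.1.contains p.1 then s
          else (s.1.insert p.1 (s.1.getD u 0 + 1), s.2 ++ [p.1]))
        (dist, rest)
      pvBfsA D fuel s.1 s.2

def excentricidade_todos_vertices (L : List (Int × List (Int × Int))) : List (Int × Int) :=
  let D := PySem.Dict.ofList L
  (D.keys.foldl
    (fun (acc : PySem.Dict Int Int) v =>
      let dist := pvBfsA D (D.keys.length + 1) (PySem.Dict.empty.insert v 0) [v]
      acc.insert v (match PySem.List.max? dist.values (fun y => y) with
        | some m => m
        | none => 0))
    PySem.Dict.empty).items

-- ===== PORT B =====
-- new = {w for u in reach for w,_ in L[u]} - reach  (a Set: order-insensitive downstream — emptiness, union)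
def pvNew (D : PySem.Dict Int (List (Int × Int))) (reach : PySem.Set Int) : PySem.Set Int :=
  PySem.Set.diff (PySem.Set.ofList (reach.flatMap (fun u => (D.getD u []).map Prod.fst))) reach

-- while True: if not new: return depth; reach |= new; depth += 1   (fuel bounds the rounds)
def pvFix (D : PySem.Dict Int (List (Int × Int))) : Nat → PySem.Set Int → Int → Int
  | 0, _, depth => depth
  | fuel + 1, reach, depth =>
      let new := pvNew D reach
      if new = [] then depth
      else pvFix D fuel (PySem.Set.union reach new) (depth + 1)

-- {v: ecc(v) for v in L}: the dict keys are distinct, so the comprehension is this map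
def excentricidade_todos_vertices_alt (L : List (Int × List (Int × Int))) : List (Int × Int) :=
  let D := PySem.Dict.ofList L
  D.keys.map (fun v => (v, pvFix D (D.keys.length + 1) (PySem.Set.ofList [v]) 0))

-- ===== PRECONDITION & SPEC =====
-- Pre_ excludes exactly the inputs on which the Python raises KeyError: a neighbour listed in
-- some (live) adjacency list that is not itself a key of the dict (every such neighbour is
-- reached by the BFS started at its own vertex, so A raises there, and B raises there too).
def Pre_excentricidade_todos_vertices (L : List (Int × List (Int × Int))) : Prop :=
  ∀ p ∈ (PySem.Dict.ofList L).items, ∀ q ∈ p.2, q.1 ∈ (PySem.Dict.ofList L).keys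
instance (L : List (Int × List (Int × Int))) : Decidable (Pre_excentricidade_todos_vertices L) := by
  unfold Pre_excentricidade_todos_vertices; infer_instance

def pvWitness_excentricidade_todos_vertices : (List (Int × List (Int × Int))) :=
  [(0, [(1, 7)]), (1, [(0, 2), (2, 1)]), (2, []), (5, [])]

def Spec_excentricidade_todos_vertices (L : List (Int × List (Int × Int))) (out : List (Int × Int)) : Prop := out = excentricidade_todos_vertices_alt L
instance (L : List (Int × List (Int × Int))) (out : List (Int × Int)) : Decidable (Spec_excentricidade_todos_vertices L out) := by unfold Spec_excentricidade_todos_vertices; infer_instance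

-- ===== CLAIM (what is proved, stated in full; the proofs are below) =====
def Claim_equal_excentricidade_todos_vertices : Prop := ∀ (L : List (Int × List (Int × Int))), Dom_excentricidade_todos_vertices L → Pre_excentricidade_todos_vertices L → Spec_excentricidade_todos_vertices L (excentricidade_todos_vertices L)

-- ===== LEMMAS AND PROOFS =====

-- the list of first occurrences of yet-unseen neighbour keys, together with the grown seen-list
def pvCollect (seen : List Int) : List (Int × Int) → List Int × List Int
  | [] => (seen, [])
  | p :: t =>
      if p.1 ∈ seen then pvCollect seen t
      else
        let r := pvCollect (seen ++ [p.1]) t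
        (r.1, p.1 :: r.2)

def pvInsList (v : Int) (ws : List Int) (dd : PySem.Dict Int Int) : PySem.Dict Int Int :=
  ws.foldl (fun dd w => dd.insert w v) dd

def pvBigCollect (adjF : Int → List (Int × Int)) (seen : List Int) (q : List Int) : List Int × List Int :=
  q.foldl (fun s u => ((pvCollect s.1 (adjF u)).1, s.2 ++ (pvCollect s.1 (adjF u)).2)) (seen, [])

theorem pvCollect_fst (l : List (Int × Int)) : ∀ seen, (pvCollect seen l).1 = seen ++ (pvCollect seen l).2 := by
  induction l with
  | nil => intro seen; simp [pvCollect]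
  | cons p t ih =>
    intro seen
    by_cases h : p.1 ∈ seen
    · simpa [pvCollect, h] using ih seen
    · simp only [pvCollect, if_neg h]
      simp [ih (seen ++ [p.1])]

theorem pvCollect_fresh (l : List (Int × Int)) : ∀ seen, ∀ w ∈ (pvCollect seen l).2, w ∉ seen := by
  induction l with
  | nil => intro seen w hw; simp [pvCollect] at hw
  | cons p t ih =>
    intro seen w hw
    by_cases h : p.1 ∈ seen
    · simp only [pvCollect, if_pos h] at hw; exact ih seen w hw
    · simp only [pvCollect, if_neg h] at hw
      rcases List.mem_cons.1 hw with rfl | hw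
      · exact h
      · intro hs
        exact ih (seen ++ [p.1]) w hw (by simp [hs])

theorem pvCollect_nodup (l : List (Int × Int)) : ∀ seen, seen.Nodup → (pvCollect seen l).1.Nodup := by
  induction l with
  | nil => intro seen h; simpa [pvCollect] using h
  | cons p t ih =>
    intro seen h
    by_cases hp : p.1 ∈ seen
    · simpa [pvCollect, hp] using ih seen h
    · simp only [pvCollect, if_neg hp]
      exact ih (seen ++ [p.1]) (by simp [List.nodup_append, h]; intro a ha e; exact hp (e ▸ ha))

theorem pvCollect_sub (l : List (Int × Int)) : ∀ seen, ∀ w ∈ (pvCollect seen l).2, w ∈ l.map Prod.fst := by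
  induction l with
  | nil => intro seen w hw; simp [pvCollect] at hw
  | cons p t ih =>
    intro seen w hw
    by_cases h : p.1 ∈ seen
    · simp only [pvCollect, if_pos h] at hw
      exact List.mem_cons_of_mem _ (ih seen w hw)
    · simp only [pvCollect, if_neg h] at hw
      rcases List.mem_cons.1 hw with rfl | hw
      · exact List.mem_cons_self
      · exact List.mem_cons_of_mem _ (ih (seen ++ [p.1]) w hw)

theorem pvCollect_complete (l : List (Int × Int)) : ∀ seen w, w ∈ l.map Prod.fst → w ∈ (pvCollect seen l).1 := by
  induction l with
  | nil => intro seen w hw; simp at hw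
  | cons p t ih =>
    intro seen w hw
    rcases List.mem_cons.1 hw with rfl | hw
    · by_cases h : p.1 ∈ seen
      · simp only [pvCollect, if_pos h]
        rw [pvCollect_fst]; exact List.mem_append_left _ h
      · simp only [pvCollect, if_neg h]
        rw [pvCollect_fst]; exact List.mem_append_left _ (by simp)
    · by_cases h : p.1 ∈ seen
      · simp only [pvCollect, if_pos h]; exact ih seen w hw
      · simp only [pvCollect, if_neg h]; exact ih (seen ++ [p.1]) w hw

theorem pvBigCollect_shift (adjF : Int → List (Int × Int)) (q : List Int) : ∀ seen out,
    q.foldl (fun s u => ((pvCollect s.1 (adjF u)).1, s.2 ++ (pvCollect s.1 (adjF u)).2)) (seen, out)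
      = ((pvBigCollect adjF seen q).1, out ++ (pvBigCollect adjF seen q).2) := by
  induction q with
  | nil => intro seen out; simp [pvBigCollect]
  | cons u t ih =>
    intro seen out
    simp only [pvBigCollect, List.foldl_cons]
    rw [ih, ih]
    simp

theorem pvBigCollect_cons (adjF : Int → List (Int × Int)) (seen : List Int) (u : Int) (t : List Int) :
    pvBigCollect adjF seen (u :: t)
      = ((pvBigCollect adjF (pvCollect seen (adjF u)).1 t).1,
         (pvCollect seen (adjF u)).2 ++ (pvBigCollect adjF (pvCollect seen (adjF u)).1 t).2) := by
  simp only [pvBigCollect, List.foldl_cons]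
  rw [pvBigCollect_shift]
  simp [pvBigCollect]

theorem pvBigCollect_fst (adjF : Int → List (Int × Int)) (q : List Int) : ∀ seen,
    (pvBigCollect adjF seen q).1 = seen ++ (pvBigCollect adjF seen q).2 := by
  induction q with
  | nil => intro seen; simp [pvBigCollect]
  | cons u t ih =>
    intro seen
    rw [pvBigCollect_cons]
    simp only
    rw [ih, pvCollect_fst]
    simp

theorem pvBigCollect_fresh (adjF : Int → List (Int × Int)) (q : List Int) : ∀ seen,
    ∀ w ∈ (pvBigCollect adjF seen q).2, w ∉ seen := by
  induction q with
  | nil => intro seen w hw; simp [pvBigCollect] at hw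
  | cons u t ih =>
    intro seen w hw
    rw [pvBigCollect_cons] at hw
    simp only [List.mem_append] at hw
    rcases hw with hw | hw
    · exact pvCollect_fresh _ seen w hw
    · intro hs
      exact ih _ w hw (by rw [pvCollect_fst]; exact List.mem_append_left _ hs)

theorem pvBigCollect_nodup (adjF : Int → List (Int × Int)) (q : List Int) : ∀ seen,
    seen.Nodup → (pvBigCollect adjF seen q).1.Nodup := by
  induction q with
  | nil => intro seen h; simpa [pvBigCollect] using h
  | cons u t ih =>
    intro seen h
    rw [pvBigCollect_cons]
    exact ih _ (pvCollect_nodup _ seen h)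

theorem pvBigCollect_sub (adjF : Int → List (Int × Int)) (q : List Int) : ∀ seen,
    ∀ w ∈ (pvBigCollect adjF seen q).2, ∃ u ∈ q, w ∈ (adjF u).map Prod.fst := by
  induction q with
  | nil => intro seen w hw; simp [pvBigCollect] at hw
  | cons u t ih =>
    intro seen w hw
    rw [pvBigCollect_cons] at hw
    simp only [List.mem_append] at hw
    rcases hw with hw | hw
    · exact ⟨u, List.mem_cons_self, pvCollect_sub _ seen w hw⟩
    · obtain ⟨u', hu', hw'⟩ := ih _ w hw
      exact ⟨u', List.mem_cons_of_mem _ hu', hw'⟩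

theorem pvBigCollect_complete (adjF : Int → List (Int × Int)) (q : List Int) : ∀ seen,
    ∀ u ∈ q, ∀ w ∈ (adjF u).map Prod.fst, w ∈ (pvBigCollect adjF seen q).1 := by
  induction q with
  | nil => intro seen u hu; simp at hu
  | cons a t ih =>
    intro seen u hu w hw
    rw [pvBigCollect_cons]
    simp only
    rcases List.mem_cons.1 hu with rfl | hu
    · rw [pvBigCollect_fst]
      exact List.mem_append_left _ (pvCollect_complete _ seen w hw)
    · exact ih _ u hu w hw

theorem mem_pvBigCollect_snd (adjF : Int → List (Int × Int)) (seen q : List Int) (w : Int) :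
    w ∈ (pvBigCollect adjF seen q).2 ↔ w ∉ seen ∧ ∃ u ∈ q, w ∈ (adjF u).map Prod.fst := by
  constructor
  · intro hw
    exact ⟨pvBigCollect_fresh adjF q seen w hw, pvBigCollect_sub adjF q seen w hw⟩
  · rintro ⟨hns, u, hu, hw⟩
    have h1 := pvBigCollect_complete adjF q seen u hu w hw
    rw [pvBigCollect_fst] at h1
    rcases List.mem_append.1 h1 with h | h
    · exact absurd h hns
    · exact h

theorem pvInsList_items (v : Int) (ws : List Int) : ∀ dd : PySem.Dict Int Int,
    (∀ w ∈ ws, w ∉ dd.keys) → ws.Nodup →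
    (pvInsList v ws dd).items = dd.items ++ ws.map (fun w => (w, v)) := by
  intro dd hf hnd
  have := PySem.Dict.items_foldl_insert_fresh (l := ws) (k := fun w => w) (v := fun _ => v) (d := dd)
    (by intro a ha
        have : a ∉ dd.keys := hf a ha
        rw [PySem.Dict.contains_eq_decide_mem_keys]
        simpa using this)
    (by simpa using hnd)
  simpa [pvInsList] using this

theorem pvInsList_keys (v : Int) (ws : List Int) (dd : PySem.Dict Int Int)
    (hf : ∀ w ∈ ws, w ∉ dd.keys) (hnd : ws.Nodup) :
    (pvInsList v ws dd).keys = dd.keys ++ ws := by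
  have h := pvInsList_items v ws dd hf hnd
  simp only [PySem.Dict.keys] at *
  rw [h]
  simp [Function.comp_def]

theorem pvInsList_getD_old (v : Int) (ws : List Int) : ∀ dd : PySem.Dict Int Int, ∀ x,
    x ∉ ws → (pvInsList v ws dd).getD x 0 = dd.getD x 0 := by
  induction ws with
  | nil => intro dd x _; simp [pvInsList]
  | cons w t ih =>
    intro dd x hx
    simp only [pvInsList, List.foldl_cons]
    rw [show (t.foldl (fun dd w => dd.insert w v) (dd.insert w v)) = pvInsList v t (dd.insert w v) from rfl]
    rw [ih _ x (fun h => hx (List.mem_cons_of_mem _ h))]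
    exact PySem.Dict.getD_insert_of_ne _ _ _ (fun e => hx (by rw [e]; exact List.mem_cons_self))

theorem pvDict_getD_mem_values (dd : PySem.Dict Int Int) (u : Int)
    (hu : u ∈ dd.keys) : dd.getD u 0 ∈ dd.values := by
  have hc : dd.contains u = true := by
    rw [PySem.Dict.contains_eq_decide_mem_keys]; simpa using hu
  rw [PySem.Dict.contains_eq_isSome_get?] at hc
  obtain ⟨a, ha⟩ := Option.isSome_iff_exists.1 hc
  have := PySem.Dict.mem_items_of_get?_eq_some _ ha
  rw [PySem.Dict.getD_of_get?_eq_some _ _ ha]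
  simp only [PySem.Dict.values]
  exact List.mem_map.2 ⟨(u, a), this, rfl⟩

-- A's inner for-loop over one adjacency list
theorem pvInnerA (u : Int) (l : List (Int × Int)) : ∀ (dist : PySem.Dict Int Int) (q : List Int),
    u ∈ dist.keys →
    l.foldl (fun (s : PySem.Dict Int Int × List Int) p =>
        if s.1.contains p.1 then s
        else (s.1.insert p.1 (s.1.getD u 0 + 1), s.2 ++ [p.1])) (dist, q)
      = (pvInsList (dist.getD u 0 + 1) (pvCollect dist.keys l).2 dist,
         q ++ (pvCollect dist.keys l).2) := by
  induction l with
  | nil => intro dist q _; simp [pvCollect, pvInsList]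
  | cons p t ih =>
    intro dist q hu
    by_cases h : p.1 ∈ dist.keys
    · have hc : dist.contains p.1 = true := (PySem.Dict.contains_iff_mem_keys _ _).2 h
      simp only [List.foldl_cons, hc, if_true]
      rw [ih dist q hu]
      simp [pvCollect, h]
    · have hc : dist.contains p.1 = false := by
        rw [PySem.Dict.contains_eq_decide_mem_keys]; simpa using h
      simp only [List.foldl_cons, hc, Bool.false_eq_true, if_false]
      have hkeys : (dist.insert p.1 (dist.getD u 0 + 1)).keys = dist.keys ++ [p.1] :=
        PySem.Dict.keys_insert_of_not_contains _ _ hc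
      rw [ih (dist.insert p.1 (dist.getD u 0 + 1)) (q ++ [p.1])
            (by rw [hkeys]; exact List.mem_append_left _ hu)]
      have hgu : (dist.insert p.1 (dist.getD u 0 + 1)).getD u 0 = dist.getD u 0 :=
        PySem.Dict.getD_insert_of_ne _ _ _ (fun e => h (e ▸ hu))
      rw [hgu, hkeys]
      simp only [pvCollect, if_neg h]
      simp [pvInsList]

-- A's queue processes a whole layer: queue = rest-of-layer ++ already-collected-next-layer
theorem pvLayerA (D : PySem.Dict Int (List (Int × Int))) (d : Int) (q1 : List Int) :
    ∀ (f : Nat) (dist : PySem.Dict Int Int) (q2 : List Int),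
    dist.keys.Nodup →
    (∀ u ∈ q1, u ∈ dist.keys ∧ dist.getD u 0 = d) →
    pvBfsA D (q1.length + f) dist (q1 ++ q2)
      = pvBfsA D f (pvInsList (d + 1) (pvBigCollect (fun u => D.getD u []) dist.keys q1).2 dist)
          (q2 ++ (pvBigCollect (fun u => D.getD u []) dist.keys q1).2) := by
  induction q1 with
  | nil =>
    intro f dist q2 _ _
    simp [pvBigCollect, pvInsList]
  | cons u t ih =>
    intro f dist q2 hnd hmem
    obtain ⟨hu, hud⟩ := hmem u List.mem_cons_self
    have hstep : (u :: t).length + f = (t.length + f) + 1 := by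
      simp [List.length_cons]; omega
    rw [hstep, List.cons_append]
    have hinner := pvInnerA u (D.getD u []) dist (t ++ q2) hu
    simp only [pvBfsA, hinner, hud]
    have hfreshc : ∀ w ∈ (pvCollect dist.keys (D.getD u [])).2, w ∉ dist.keys :=
      pvCollect_fresh _ _
    have h1 : (dist.keys ++ (pvCollect dist.keys (D.getD u [])).2).Nodup := by
      rw [← pvCollect_fst]; exact pvCollect_nodup _ _ hnd
    have hcnd : (pvCollect dist.keys (D.getD u [])).2.Nodup := (List.nodup_append.1 h1).2.1
    have hkeys' : (pvInsList (d + 1) (pvCollect dist.keys (D.getD u [])).2 dist).keys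
        = dist.keys ++ (pvCollect dist.keys (D.getD u [])).2 :=
      pvInsList_keys _ _ _ hfreshc hcnd
    rw [List.append_assoc]
    rw [ih f (pvInsList (d + 1) (pvCollect dist.keys (D.getD u [])).2 dist) (q2 ++ (pvCollect dist.keys (D.getD u [])).2)
          (by rw [hkeys']; exact h1)
          (by
            intro u' hu'
            obtain ⟨h1', h2'⟩ := hmem u' (List.mem_cons_of_mem _ hu')
            refine ⟨by rw [hkeys']; exact List.mem_append_left _ h1', ?_⟩
            rw [pvInsList_getD_old _ _ _ _ (fun hcc => hfreshc u' hcc h1'), h2'])]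
    rw [hkeys', pvBigCollect_cons]
    rw [show (pvCollect dist.keys (D.getD u [])).1 = dist.keys ++ (pvCollect dist.keys (D.getD u [])).2 from pvCollect_fst _ _]
    simp [pvInsList, List.foldl_append]

-- B's set comprehension minus reach, characterised by membership
theorem mem_pvNew (D : PySem.Dict Int (List (Int × Int))) (reach : PySem.Set Int) (w : Int) :
    w ∈ pvNew D reach ↔ (∃ u ∈ reach, w ∈ ((D.getD u []).map Prod.fst)) ∧ w ∉ reach := by
  unfold pvNew
  rw [PySem.Set.mem_diff, PySem.Set.mem_ofList, List.mem_flatMap]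

-- synchronized layer induction: A's max distance = B's round count
theorem pvSync (D : PySem.Dict Int (List (Int × Int)))
    (hAdj : ∀ u : Int, ∀ w ∈ (D.getD u []).map Prod.fst, w ∈ D.keys) :
    ∀ (fB fA : Nat) (dist : PySem.Dict Int Int) (q : List Int) (d : Int) (reach : PySem.Set Int),
    dist.keys.Nodup → dist.keys ⊆ D.keys → q ≠ [] →
    (∀ u ∈ q, u ∈ dist.keys ∧ dist.getD u 0 = d) →
    (∀ x ∈ dist.values, x ≤ d) →
    (∀ x, x ∈ reach ↔ x ∈ dist.keys) →
    (∀ u ∈ dist.keys, u ∉ q → ∀ w ∈ (D.getD u []).map Prod.fst, w ∈ dist.keys) →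
    q.length + (D.keys.length - dist.keys.length) + 1 ≤ fA →
    (D.keys.length - dist.keys.length) + 1 ≤ fB →
    (match PySem.List.max? (pvBfsA D fA dist q).values (fun y => y) with
      | some m => m | none => 0) = pvFix D fB reach d := by
  intro fB
  induction fB with
  | zero => intro fA dist q d reach _ _ _ _ _ _ _ _ hfB; omega
  | succ fB' ih =>
    intro fA dist q d reach hnd hsub hq hqm hval hreach hclos hfA hfB
    obtain ⟨u0, qt, rfl⟩ := List.exists_cons_of_ne_nil hq
    have hflen : (u0 :: qt).length ≤ fA := by omega
    obtain ⟨f, hf⟩ : ∃ f, fA = (u0 :: qt).length + f := ⟨fA - (u0 :: qt).length, by omega⟩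
    have hA : pvBfsA D fA dist (u0 :: qt)
        = pvBfsA D f
            (pvInsList (d + 1) (pvBigCollect (fun u => D.getD u []) dist.keys (u0 :: qt)).2 dist)
            (pvBigCollect (fun u => D.getD u []) dist.keys (u0 :: qt)).2 := by
      have h := pvLayerA D d (u0 :: qt) f dist [] hnd (by simpa using hqm)
      simp only [List.append_nil, List.nil_append] at h
      rw [hf, h]
    set N := (pvBigCollect (fun u => D.getD u []) dist.keys (u0 :: qt)).2 with hN
    -- the new round of B has exactly the members of A's next layer N
    have hmemNB : ∀ w, w ∈ pvNew D reach ↔ w ∈ N := by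
      intro w
      rw [mem_pvNew, hN, mem_pvBigCollect_snd]
      constructor
      · rintro ⟨⟨u, hu, hw⟩, hwn⟩
        have hu' : u ∈ dist.keys := (hreach u).1 hu
        have hwn' : w ∉ dist.keys := fun h => hwn ((hreach w).2 h)
        refine ⟨hwn', u, ?_, hw⟩
        by_contra huq
        exact hwn' (hclos u hu' huq w hw)
      · rintro ⟨hwn, u, hu, hw⟩
        exact ⟨⟨u, (hreach u).2 (hqm u hu).1, hw⟩, fun h => hwn ((hreach w).1 h)⟩
    have hempty : (pvNew D reach = []) ↔ (N = []) := by
      simp only [List.eq_nil_iff_forall_not_mem]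
      constructor
      · intro h w hw; exact h w ((hmemNB w).2 hw)
      · intro h w hw; exact h w ((hmemNB w).1 hw)
    have hfreshN : ∀ w ∈ N, w ∉ dist.keys := pvBigCollect_fresh _ _ _
    have h1 : (dist.keys ++ N).Nodup := by
      rw [← pvBigCollect_fst]; exact pvBigCollect_nodup _ _ _ hnd
    have hNnd : N.Nodup := (List.nodup_append.1 h1).2.1
    have hkeys' : (pvInsList (d + 1) N dist).keys = dist.keys ++ N :=
      pvInsList_keys _ _ _ hfreshN hNnd
    rw [hA]
    by_cases hNe : N = []
    · have hnewe : pvNew D reach = [] := hempty.2 hNe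
      have hB : pvFix D (fB' + 1) reach d = d := by
        simp [pvFix, hnewe]
      rw [hB, hNe]
      have hdist : pvInsList (d + 1) ([] : List Int) dist = dist := rfl
      rw [hdist]
      obtain ⟨f', rfl⟩ : ∃ f', f = f' + 1 := ⟨f - 1, by omega⟩
      have : pvBfsA D (f' + 1) dist [] = dist := by simp [pvBfsA]
      rw [this]
      obtain ⟨hu0, hu0d⟩ := hqm u0 List.mem_cons_self
      have hdv : d ∈ dist.values := by
        have := pvDict_getD_mem_values dist u0 hu0
        rwa [hu0d] at this
      cases hm : PySem.List.max? dist.values (fun y => y) with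
      | none =>
        rw [PySem.List.max?_eq_none_iff] at hm
        rw [hm] at hdv; simp at hdv
      | some m =>
        have h2 : m ∈ dist.values := PySem.List.max?_mem hm
        have h3 : d ≤ m := PySem.List.max?_isMax hm d hdv
        have h4 : m ≤ d := hval m h2
        simp [le_antisymm h4 h3]
    · have hnewe : pvNew D reach ≠ [] := fun h => hNe (hempty.1 h)
      have hB : pvFix D (fB' + 1) reach d
          = pvFix D fB' (PySem.Set.union reach (pvNew D reach)) (d + 1) := by
        simp only [pvFix, if_neg hnewe]
      rw [hB]
      have hlenpos : 0 < N.length := List.length_pos_iff.2 hNe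
      have hsub' : dist.keys ++ N ⊆ D.keys := by
        intro w hw
        rcases List.mem_append.1 hw with hw | hw
        · exact hsub hw
        · obtain ⟨u', _, hw'⟩ := pvBigCollect_sub _ _ _ w hw
          exact hAdj u' w hw'
      have hlen' : (dist.keys ++ N).length ≤ D.keys.length :=
        (h1.subperm hsub').length_le
      have hitems : (pvInsList (d + 1) N dist).items
          = dist.items ++ N.map (fun w => (w, d + 1)) := pvInsList_items _ _ _ hfreshN hNnd
      have hvals : (pvInsList (d + 1) N dist).values
          = dist.values ++ N.map (fun _ => d + 1) := by
        simp only [PySem.Dict.values, hitems]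
        simp [Function.comp_def]
      have := ih f (pvInsList (d + 1) N dist) N (d + 1) (PySem.Set.union reach (pvNew D reach))
        (by rw [hkeys']; exact h1)
        (by rw [hkeys']; exact hsub')
        hNe
        (by
          intro w hw
          refine ⟨by rw [hkeys']; exact List.mem_append_right _ hw, ?_⟩
          exact PySem.Dict.getD_of_mem_items _
            (by rw [hitems]; exact List.mem_append_right _ (List.mem_map.2 ⟨w, hw, rfl⟩))
            (by rw [hkeys']; exact h1) 0)
        (by
          intro x hx
          rw [hvals] at hx
          rcases List.mem_append.1 hx with hx | hx
          · exact le_trans (hval x hx) (by omega)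
          · obtain ⟨_, _, rfl⟩ := List.mem_map.1 hx
            exact le_refl _)
        (by
          intro x
          rw [PySem.Set.mem_union, hkeys', List.mem_append, hreach x, hmemNB x])
        (by
          intro u hu hun w hw
          rw [hkeys'] at hu ⊢
          rcases List.mem_append.1 hu with hu | hu
          · by_cases huq : u ∈ u0 :: qt
            · by_cases hwk : w ∈ dist.keys
              · exact List.mem_append_left _ hwk
              · refine List.mem_append_right _ ?_
                rw [hN, mem_pvBigCollect_snd]
                exact ⟨hwk, u, huq, hw⟩
            · exact List.mem_append_left _ (hclos u hu huq w hw)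
          · exact absurd hu hun)
        (by
          rw [hkeys']
          simp only [List.length_append] at hlen' ⊢
          have h5 : (u0 :: qt).length + (D.keys.length - dist.keys.length) + 1
              ≤ (u0 :: qt).length + f := by rw [← hf]; exact hfA
          omega)
        (by
          rw [hkeys']
          simp only [List.length_append] at hlen' ⊢
          omega)
      exact this

-- ===== VERDICT (by name: the statement is the Claim_ definition above) =====
theorem excentricidade_todos_vertices_spec : Claim_equal_excentricidade_todos_vertices := by
  intro L _ hPre
  unfold Spec_excentricidade_todos_vertices
  unfold Pre_excentricidade_todos_vertices at hPre
  simp only [excentricidade_todos_vertices, excentricidade_todos_vertices_alt]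
  have hK : (PySem.Dict.ofList L).keys.Nodup := PySem.Dict.nodup_keys_ofList L
  have hAdj : ∀ u : Int, ∀ w ∈ ((PySem.Dict.ofList L).getD u []).map Prod.fst,
      w ∈ (PySem.Dict.ofList L).keys := by
    intro u w hw
    by_cases hc : (PySem.Dict.ofList L).contains u = true
    · have hs : ((PySem.Dict.ofList L).get? u).isSome := by
        rw [← PySem.Dict.contains_eq_isSome_get?]; exact hc
      obtain ⟨a, ha⟩ := Option.isSome_iff_exists.1 hs
      have hga : (PySem.Dict.ofList L).getD u [] = a := PySem.Dict.getD_of_get?_eq_some _ _ ha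
      have hmem := PySem.Dict.mem_items_of_get?_eq_some _ ha
      rw [hga] at hw
      obtain ⟨q, hq, rfl⟩ := List.mem_map.1 hw
      exact hPre _ hmem q hq
    · have hz : (PySem.Dict.ofList L).getD u [] = [] :=
        PySem.Dict.getD_of_not_contains _ _ (by simpa using hc)
      rw [hz] at hw; simp at hw
  -- turn A's fold over fresh distinct keys into a map, then compare pointwise
  have hfold := PySem.Dict.items_foldl_insert_fresh (l := (PySem.Dict.ofList L).keys)
    (k := fun v => v)
    (v := fun v => (match PySem.List.max? (pvBfsA (PySem.Dict.ofList L) ((PySem.Dict.ofList L).keys.length + 1)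
          (PySem.Dict.empty.insert v 0) [v]).values (fun y => y) with
        | some m => m
        | none => 0))
    (d := PySem.Dict.empty)
    (by intro a _; rfl)
    (by simpa using hK)
  rw [hfold]
  have hempty : (PySem.Dict.empty : PySem.Dict Int Int).items = [] := rfl
  rw [hempty, List.nil_append]
  refine List.map_congr_left ?_
  intro v hv
  have hkeys0 : (PySem.Dict.empty.insert v (0 : Int)).keys = [v] := by
    rw [PySem.Dict.keys_insert_of_not_contains _ _ (by rfl)]
    rfl
  have hitems0 : (PySem.Dict.empty.insert v (0 : Int)).items = [(v, 0)] := by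
    rw [PySem.Dict.items_insert_of_not_contains _ _ (by rfl)]
    rfl
  have hvalues0 : (PySem.Dict.empty.insert v (0 : Int)).values = [0] := by
    simp only [PySem.Dict.values, hitems0]; rfl
  have hKpos : 1 ≤ (PySem.Dict.ofList L).keys.length :=
    List.length_pos_iff.2 (List.ne_nil_of_mem hv)
  have h := pvSync (PySem.Dict.ofList L) hAdj
    ((PySem.Dict.ofList L).keys.length + 1) ((PySem.Dict.ofList L).keys.length + 1)
    (PySem.Dict.empty.insert v 0) [v] 0 (PySem.Set.ofList [v])
    (by rw [hkeys0]; simp)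
    (by rw [hkeys0]; intro x hx; simp at hx; subst hx; exact hv)
    (by simp)
    (by
      intro u hu
      simp only [List.mem_singleton] at hu
      subst hu
      exact ⟨by rw [hkeys0]; simp, PySem.Dict.getD_insert_self _ _ _ _⟩)
    (by intro x hx; rw [hvalues0] at hx; simp at hx; omega)
    (by intro x; rw [hkeys0, PySem.Set.mem_ofList])
    (by
      intro u hu hun w _
      rw [hkeys0] at hu
      exact absurd hu hun)
    (by rw [hkeys0]; simp only [List.length_singleton]; omega)
    (by rw [hkeys0]; simp only [List.length_singleton]; omega)
  simp only [Prod.mk.injEq, true_and]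
  exact h
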